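-- pv_equiv track=rewrite | github.com/sunghj1118/algorithm | 백준/Bronze/20709. Kate's 2021 Celebration/Kate's 2021 Celebration.py | has2021
-- ===== SOURCE A (Python) =====
-- def has2021(digits):
-- 	required_digits = {'2': 2, '0': 1, '1': 1}
-- 	digits = str(digits)
-- 	for digit in digits:
-- 		if digit in required_digits:
-- 			required_digits[digit] -= 1
-- 			if all(count <= 0 for count in required_digits.values()):
-- 				return True
-- 	return False
-- ===== SOURCE B (Python) =====
-- def has2021(digits):
--     s = str(digits)
--     return s.count('2') >= 2 and s.count('0') >= 1 and s.count('1') >= 1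
-- ===== Notes on version B (the rewrite author's own statement) =====
-- stated objective: simpler
-- what changed: Replaces A's single stateful pass (decrementing a requirement dict with an early return once all counts drop to zero) by a stateless closed-form test: three independent character-count scans combined with boolean AND.
import Mathlib
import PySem

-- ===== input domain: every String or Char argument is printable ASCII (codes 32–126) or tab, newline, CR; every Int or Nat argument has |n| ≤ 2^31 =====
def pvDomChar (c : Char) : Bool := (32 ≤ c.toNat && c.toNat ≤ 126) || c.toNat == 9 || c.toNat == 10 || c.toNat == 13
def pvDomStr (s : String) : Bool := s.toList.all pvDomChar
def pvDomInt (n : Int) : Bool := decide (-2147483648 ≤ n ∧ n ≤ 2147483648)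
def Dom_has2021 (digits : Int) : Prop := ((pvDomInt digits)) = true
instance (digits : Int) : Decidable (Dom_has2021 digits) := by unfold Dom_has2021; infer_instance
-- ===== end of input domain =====

-- B replaces A's single stateful pass (decrementing a requirement dict with early return)
-- by a stateless closed-form test of three independent character counts (objective: simpler).


-- ===== PORT A =====
-- the for-loop over str(digits), carrying the mutable dict required_digits
def has2021Loop : List Char → PySem.Dict Char Int → Bool
  | [], _ => false
  | digit :: rest, req =>
    if req.contains digit then
      let req' := req.modify digit 0 (· - 1)
      if req'.values.all (fun count => decide (count ≤ 0)) then true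
      else has2021Loop rest req'
    else has2021Loop rest req

def has2021 (digits : Int) : Bool :=
  has2021Loop (PySem.Int.toStr digits).toList
    (PySem.Dict.ofList [('2', 2), ('0', 1), ('1', 1)])

-- ===== PORT B =====
def has2021_alt (digits : Int) : Bool :=
  let s := PySem.Int.toStr digits
  decide (PySem.Str.count s "2" ≥ 2) && decide (PySem.Str.count s "0" ≥ 1)
    && decide (PySem.Str.count s "1" ≥ 1)

-- ===== PRECONDITION & SPEC =====
def Spec_has2021 (digits : Int) (out : Bool) : Prop := out = has2021_alt digits
instance (digits : Int) (out : Bool) : Decidable (Spec_has2021 digits out) := by unfold Spec_has2021; infer_instance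

-- ===== CLAIM (what is proved, stated in full; the proofs are below) =====
def Claim_equal_has2021 : Prop := ∀ (digits : Int), Dom_has2021 digits → Spec_has2021 digits (has2021 digits)

-- ===== LEMMAS AND PROOFS =====

-- Python's str.count with a single-character needle counts that character.
theorem chars_count_go_single (c : Char) (l : List Char) (fuel acc : Nat)
    (h : l.length ≤ fuel) :
    PySem.Chars.count.go [c] fuel l acc = acc + l.count c := by
  induction l generalizing fuel acc with
  | nil => cases fuel <;> simp [PySem.Chars.count.go]
  | cons x t ih =>
    cases fuel with
    | zero => simp at h
    | succ f =>
      simp only [List.length_cons, Nat.succ_le_succ_iff] at h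
      by_cases hx : c = x
      · subst hx
        simp [PySem.Chars.count.go, List.isPrefixOf, ih f (acc + 1) h,
          List.count_cons_self]
        omega
      · simp [PySem.Chars.count.go, List.isPrefixOf, hx,
          Ne.symm hx, ih f acc h, List.count_cons_of_ne (Ne.symm hx)]

theorem str_count_single (s : String) (c : Char) :
    PySem.Str.count s (String.ofList [c]) = s.toList.count c := by
  simp [PySem.Str.count, PySem.Chars.count,
    chars_count_go_single c s.toList s.length 0 (by simp [PySem.Str.len])]

-- dict operations on the literal requirement dict reduce by rfl
theorem dict_contains2 (a b c : Int) :
    (PySem.Dict.mk [('2', a), ('0', b), ('1', c)]).contains '2' = true := rfl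
theorem dict_contains0 (a b c : Int) :
    (PySem.Dict.mk [('2', a), ('0', b), ('1', c)]).contains '0' = true := rfl
theorem dict_contains1 (a b c : Int) :
    (PySem.Dict.mk [('2', a), ('0', b), ('1', c)]).contains '1' = true := rfl
theorem dict_modify2 (a b c : Int) :
    (PySem.Dict.mk [('2', a), ('0', b), ('1', c)]).modify '2' 0 (· - 1) =
      PySem.Dict.mk [('2', a - 1), ('0', b), ('1', c)] := rfl
theorem dict_modify0 (a b c : Int) :
    (PySem.Dict.mk [('2', a), ('0', b), ('1', c)]).modify '0' 0 (· - 1) =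
      PySem.Dict.mk [('2', a), ('0', b - 1), ('1', c)] := rfl
theorem dict_modify1 (a b c : Int) :
    (PySem.Dict.mk [('2', a), ('0', b), ('1', c)]).modify '1' 0 (· - 1) =
      PySem.Dict.mk [('2', a), ('0', b), ('1', c - 1)] := rfl
theorem dict_values (a b c : Int) :
    (PySem.Dict.mk [('2', a), ('0', b), ('1', c)]).values = [a, b, c] := rfl
theorem dict_contains_other (a b c : Int) (d : Char)
    (h2 : d ≠ '2') (h0 : d ≠ '0') (h1 : d ≠ '1') :
    (PySem.Dict.mk [('2', a), ('0', b), ('1', c)]).contains d = false := by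
  simp [PySem.Dict.contains, PySem.Dict.get?]
  exact ⟨fun h => h2 h.symm, fun h => h0 h.symm, fun h => h1 h.symm⟩

-- Characterisation of A's loop on the (fixed-shape) requirement dict.
theorem has2021Loop_true (cs : List Char) (a b c : Int) :
    has2021Loop cs (PySem.Dict.mk [('2', a), ('0', b), ('1', c)]) = true ↔
      (a ≤ cs.count '2' ∧ b ≤ cs.count '0' ∧ c ≤ cs.count '1' ∧
        1 ≤ cs.count '2' + cs.count '0' + cs.count '1') := by
  induction cs generalizing a b c with
  | nil => simp [has2021Loop]
  | cons d rest ih =>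
    by_cases h2 : d = '2'
    · subst h2
      rw [has2021Loop, dict_contains2, if_pos rfl, dict_modify2]
      simp only [dict_values]
      split_ifs with hc <;>
        simp only [List.all_cons, List.all_nil, Bool.and_true, Bool.and_eq_true,
          decide_eq_true_eq] at hc <;>
        [skip; rw [ih]] <;> simp [List.count_cons] <;> omega
    · by_cases h0 : d = '0'
      · subst h0
        rw [has2021Loop, dict_contains0, if_pos rfl, dict_modify0]
        simp only [dict_values]
        split_ifs with hc <;>
          simp only [List.all_cons, List.all_nil, Bool.and_true, Bool.and_eq_true,
            decide_eq_true_eq] at hc <;>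
          [skip; rw [ih]] <;> simp [List.count_cons] <;> omega
      · by_cases h1 : d = '1'
        · subst h1
          rw [has2021Loop, dict_contains1, if_pos rfl, dict_modify1]
          simp only [dict_values]
          split_ifs with hc <;>
            simp only [List.all_cons, List.all_nil, Bool.and_true, Bool.and_eq_true,
              decide_eq_true_eq] at hc <;>
            [skip; rw [ih]] <;> simp [List.count_cons] <;> omega
        · rw [has2021Loop, dict_contains_other a b c d h2 h0 h1,
            if_neg (by simp), ih,
            List.count_cons_of_ne h2,
            List.count_cons_of_ne h0,
            List.count_cons_of_ne h1]

-- ===== VERDICT (by name: the statement is the Claim_ definition above) =====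
theorem has2021_spec : Claim_equal_has2021 := by
  intro digits _
  unfold Spec_has2021 has2021 has2021_alt
  have h0 : PySem.Dict.ofList [('2', (2:Int)), ('0', 1), ('1', 1)] =
      PySem.Dict.mk [('2', 2), ('0', 1), ('1', 1)] := by decide
  rw [h0, Bool.eq_iff_iff, has2021Loop_true]
  have e2 : ("2" : String) = String.ofList ['2'] := rfl
  have e0 : ("0" : String) = String.ofList ['0'] := rfl
  have e1 : ("1" : String) = String.ofList ['1'] := rfl
  rw [e2, e0, e1]
  simp only [str_count_single, Bool.and_eq_true, decide_eq_true_eq, ge_iff_le]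
  constructor
  · rintro ⟨ha, hb, hc, _⟩
    exact ⟨⟨by exact_mod_cast ha, by exact_mod_cast hb⟩, by exact_mod_cast hc⟩
  · rintro ⟨⟨ha, hb⟩, hc⟩
    refine ⟨by exact_mod_cast ha, by exact_mod_cast hb, by exact_mod_cast hc, by omega⟩
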